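-- pv_equiv track=rewrite | github.com/puzzleclone/PuzzleClone | customs/score.py | get_world_question_score
-- ===== SOURCE A (Python) =====
-- def get_world_question_score(per_scores, world_wrong_score):
--     mode_a = 0  # sum of all previous correct answers
--     mode_b = set()  # scores where at least one previous was not correct
--
--     for score in per_scores:
--         new_mode_b = set()
--         # From mode_a: can choose wrong or skip (both go to mode_b)
--         new_mode_b.add(mode_a + world_wrong_score)
--         new_mode_b.add(mode_a + 0)
--         # From existing mode_b: can choose correct (0), wrong, or skip
--         for x in mode_b:
--             new_mode_b.add(x + 0)
--             new_mode_b.add(x + world_wrong_score)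
--         mode_b = new_mode_b
--         # Update mode_a (only if correct is chosen)
--         mode_a += score
--
--     total_scores = {mode_a} | mode_b
--     return total_scores, len(total_scores)
-- ===== SOURCE B (Python) =====
-- def get_world_question_score(per_scores, world_wrong_score):
--     # Closed form: answering the first j questions correctly (prefix sum S_j) and
--     # then m of the rest wrong (1 <= m <= n-j, rest skipped) gives S_j + m*w;
--     # skipping everything after j gives S_j; all-correct gives S_n.
--     n = len(per_scores)
--     prefix = [0]
--     for s in per_scores:
--         prefix.append(prefix[-1] + s)
--     total = {prefix[n]}
--     for j in range(n - 1, -1, -1):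
--         for m in range(1, n - j + 1):
--             total.add(prefix[j] + m * world_wrong_score)
--         total.add(prefix[j])
--     return total, len(total)
-- ===== Notes on version B (the rewrite author's own statement) =====
-- stated objective: faster
-- what changed: B replaces A's per-question breadth-first set expansion (each step re-inserts every element of a set that grows to Theta(n^2)) by a closed-form enumeration over prefix sums: the achievable scores are exactly {S_n} and {S_j + m*w : 0 <= j < n, 0 <= m <= n-j}, generated directly by a double loop.
import Mathlib
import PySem

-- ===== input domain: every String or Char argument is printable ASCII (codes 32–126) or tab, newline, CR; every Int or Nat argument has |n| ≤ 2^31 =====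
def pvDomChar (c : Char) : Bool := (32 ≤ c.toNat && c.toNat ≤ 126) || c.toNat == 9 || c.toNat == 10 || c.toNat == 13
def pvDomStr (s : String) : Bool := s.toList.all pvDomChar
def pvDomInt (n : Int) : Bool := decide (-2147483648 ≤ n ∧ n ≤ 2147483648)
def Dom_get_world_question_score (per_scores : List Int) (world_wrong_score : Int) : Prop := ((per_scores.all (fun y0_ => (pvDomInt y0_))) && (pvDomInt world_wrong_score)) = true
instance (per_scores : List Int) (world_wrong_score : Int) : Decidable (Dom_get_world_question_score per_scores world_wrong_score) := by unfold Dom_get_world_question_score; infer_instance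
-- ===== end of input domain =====

-- B replaces A's cubic per-question set expansion by a closed-form O(n^2) enumeration over
-- prefix sums; equal return value (the set is built in the same first-insertion order).

-- ===== PORT A =====
def get_world_question_score (per_scores : List Int) (world_wrong_score : Int) : List Int × Int :=
  let st := per_scores.foldl
    (fun (st : Int × PySem.Set Int) score =>
      let new_mode_b : PySem.Set Int := PySem.Set.empty
      let new_mode_b := PySem.Set.add new_mode_b (st.1 + world_wrong_score)
      let new_mode_b := PySem.Set.add new_mode_b (st.1 + 0)
      let new_mode_b := st.2.foldl
        (fun s x => PySem.Set.add (PySem.Set.add s (x + 0)) (x + world_wrong_score)) new_mode_b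
      (st.1 + score, new_mode_b))
    ((0 : Int), (PySem.Set.empty : PySem.Set Int))
  let total_scores := PySem.Set.union (PySem.Set.ofList [st.1]) st.2
  (total_scores, PySem.Set.len total_scores)

-- ===== PORT B =====
-- pyGetD is exact here: every index (−1 on a nonempty list, j with 0 ≤ j ≤ n) is in range.
def get_world_question_score_alt (per_scores : List Int) (world_wrong_score : Int) : List Int × Int :=
  let n : Int := per_scores.length
  let pfx := per_scores.foldl
    (fun acc s => acc ++ [PySem.List.pyGetD acc (-1) 0 + s]) [(0 : Int)]
  let total : PySem.Set Int := PySem.Set.ofList [PySem.List.pyGetD pfx n 0]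
  let total := (PySem.List.pyRange (n - 1) (-1) (-1)).foldl
    (fun t j =>
      let t := (PySem.List.pyRange 1 (n - j + 1) 1).foldl
        (fun t m => PySem.Set.add t (PySem.List.pyGetD pfx j 0 + m * world_wrong_score)) t
      PySem.Set.add t (PySem.List.pyGetD pfx j 0))
    total
  (total, PySem.Set.len total)

-- ===== PRECONDITION & SPEC =====
def Spec_get_world_question_score (per_scores : List Int) (world_wrong_score : Int) (out : List Int × Int) : Prop := out = get_world_question_score_alt per_scores world_wrong_score
instance (per_scores : List Int) (world_wrong_score : Int) (out : List Int × Int) : Decidable (Spec_get_world_question_score per_scores world_wrong_score out) := by unfold Spec_get_world_question_score; infer_instance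

-- ===== CLAIM (what is proved, stated in full; the proofs are below) =====
def Claim_equal_get_world_question_score : Prop := ∀ (per_scores : List Int) (world_wrong_score : Int), Dom_get_world_question_score per_scores world_wrong_score → Spec_get_world_question_score per_scores world_wrong_score (get_world_question_score per_scores world_wrong_score)

-- ===== LEMMAS AND PROOFS =====

-- prefix sum of the first j (an Int index) elements
def pvSum (ps : List Int) (j : Int) : Int := (ps.take j.toNat).sum

-- the scores obtained by answering the first j questions right, then m ∈ [1, k-j] wrong, rest skipped; then S_j itself
def pvSeg (ps : List Int) (w : Int) (k : Int) (j : Int) : List Int :=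
  (PySem.List.pyRange 1 (k - j + 1) 1).map (fun m => pvSum ps j + m * w) ++ [pvSum ps j]

-- closed-form insertion sequence for mode_b after k questions
def pvF (ps : List Int) (w : Int) (k : Int) : List Int :=
  (PySem.List.pyRange (k - 1) (-1) (-1)).flatMap (pvSeg ps w k)

def pvRun (a w : Int) (t : Nat) : List Int := (List.range t).map (fun m : Nat => a + ((m : Int) + 1) * w)

def pvG (w : Int) (x : Int) : List Int := [x, x + w]

theorem pv_fold2 (w : Int) (L : List Int) (s : PySem.Set Int) :
    L.foldl (fun s x => PySem.Set.add (PySem.Set.add s (x + 0)) (x + w)) s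
      = PySem.Set.update s (L.flatMap (pvG w)) := by
  induction L generalizing s with
  | nil => simp [PySem.Set.update]
  | cons x t ih =>
    simp only [List.foldl_cons, List.flatMap_cons, pvG]
    rw [ih]
    simp [PySem.Set.update]

theorem pv_drop (c m r : List Int) (h : ∀ z ∈ m, z ∈ c) :
    PySem.Set.ofList (c ++ (m ++ r)) = PySem.Set.ofList (c ++ r) := by
  rw [PySem.Set.ofList_append, PySem.Set.update_append,
    PySem.Set.update_eq_append_filter (PySem.Set.ofList c) m]
  have hnil : (PySem.Set.ofList m).filter (fun y => !(PySem.Set.ofList c).contains y) = [] := by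
    refine List.filter_eq_nil_iff.2 ?_
    intro a ha
    have hac : a ∈ c := h a ((PySem.Set.mem_ofList _ _).1 ha)
    simp [PySem.Set.contains_eq_listContains, hac]
  rw [hnil, List.append_nil, ← PySem.Set.ofList_append]

theorem pv_filter_flatMap (g : Int → List Int) (p : Int → Bool) :
    ∀ (d c : List Int), (∀ y ∈ d, p y = false → ∀ z ∈ g y, z ∈ c) →
    PySem.Set.ofList (c ++ (d.filter p).flatMap g) = PySem.Set.ofList (c ++ d.flatMap g) := by
  intro d
  induction d with
  | nil => intro c _; simp
  | cons y d' ih =>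
    intro c h
    by_cases hp : p y = true
    · simp only [List.filter_cons, hp, if_pos, List.flatMap_cons, ← List.append_assoc]
      exact ih (c ++ g y) (fun y' hy' hpf z hz =>
        List.mem_append_left _ (h y' (List.mem_cons_of_mem _ hy') hpf z hz))
    · have hpf : p y = false := by simpa using hp
      simp only [List.filter_cons, hpf, Bool.false_eq_true, if_false, List.flatMap_cons]
      rw [ih c (fun y' hy' hf z hz => h y' (List.mem_cons_of_mem _ hy') hf z hz)]
      exact (pv_drop c (g y) (d'.flatMap g) (h y (List.mem_cons_self) hpf)).symm

theorem pv_flatMap_ofList (g : Int → List Int) :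
    ∀ (l c : List Int),
    PySem.Set.ofList (c ++ (PySem.Set.ofList l).flatMap g) = PySem.Set.ofList (c ++ l.flatMap g) := by
  intro l
  induction l with
  | nil => intro c; simp [PySem.Set.ofList]
  | cons x t ih =>
    intro c
    rw [PySem.Set.ofList_cons]
    simp only [List.flatMap_cons, ← List.append_assoc]
    have hdis : PySem.Set.discard (PySem.Set.ofList t) x
        = (PySem.Set.ofList t).filter (fun y => !(y == x)) := rfl
    rw [hdis]
    rw [pv_filter_flatMap g (fun y => !(y == x)) (PySem.Set.ofList t) (c ++ g x) ?side]
    · exact ih (c ++ g x)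
    case side =>
      intro y _ hf z hz
      have hyx : y = x := by simpa using hf
      subst hyx
      exact List.mem_append_right _ hz

theorem pv_ofList_right (c l : List Int) :
    PySem.Set.ofList (c ++ PySem.Set.ofList l) = PySem.Set.ofList (c ++ l) := by
  rw [PySem.Set.ofList_append, PySem.Set.ofList_append,
    PySem.Set.update_eq_append_filter, PySem.Set.update_eq_append_filter,
    PySem.Set.ofList_ofList]

theorem pv_runi (w a : Int) :
    ∀ (t : Nat) (c r : List Int),
    PySem.Set.ofList (c ++ ((pvRun a w (t + 1)).flatMap (pvG w) ++ r))
      = PySem.Set.ofList (c ++ (pvRun a w (t + 2) ++ r)) := by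
  intro t
  induction t with
  | zero =>
    intro c r
    have h1 : (pvRun a w 1).flatMap (pvG w) = pvRun a w 2 := by
      simp [pvRun, pvG, List.range_succ]
      ring
    rw [h1]
  | succ t ih =>
    intro c r
    have hsplit : pvRun a w (t + 2) = pvRun a w (t + 1) ++ [a + ((t : Int) + 2) * w] := by
      unfold pvRun
      rw [List.range_succ, List.map_append]
      simp only [List.map_cons, List.map_nil]
      congr 2
    have hsplit3 : pvRun a w (t + 3) = pvRun a w (t + 2) ++ [a + ((t : Int) + 3) * w] := by
      unfold pvRun
      rw [List.range_succ, List.map_append]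
      simp only [List.map_cons, List.map_nil]
      congr 2
    calc PySem.Set.ofList (c ++ ((pvRun a w (t + 2)).flatMap (pvG w) ++ r))
        = PySem.Set.ofList (c ++ ((pvRun a w (t + 1)).flatMap (pvG w)
            ++ ([a + ((t : Int) + 2) * w, a + ((t : Int) + 2) * w + w] ++ r))) := by
          rw [hsplit]
          simp [pvG, List.append_assoc]
      _ = PySem.Set.ofList (c ++ (pvRun a w (t + 2)
            ++ ([a + ((t : Int) + 2) * w, a + ((t : Int) + 2) * w + w] ++ r))) := by
          exact ih c _
      _ = PySem.Set.ofList ((c ++ pvRun a w (t + 2))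
            ++ ([a + ((t : Int) + 2) * w] ++ ([a + ((t : Int) + 2) * w + w] ++ r))) := by
          simp [List.append_assoc]
      _ = PySem.Set.ofList ((c ++ pvRun a w (t + 2)) ++ ([a + ((t : Int) + 2) * w + w] ++ r)) := by
          refine pv_drop _ _ _ ?_
          intro z hz
          simp only [List.mem_singleton] at hz
          subst hz
          refine List.mem_append_right _ ?_
          have harr : a + ((t : Int) + 2) * w = a + (((t + 1 : Nat) : Int) + 1) * w := by
            push_cast; ring
          rw [harr]
          unfold pvRun
          exact List.mem_map_of_mem (by simp : t + 1 ∈ List.range (t + 2))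
      _ = PySem.Set.ofList (c ++ (pvRun a w (t + 3) ++ r)) := by
          rw [hsplit3]
          have : a + ((t : Int) + 2) * w + w = a + ((t : Int) + 3) * w := by ring
          rw [this]
          simp [List.append_assoc]

theorem pv_seg_step (w a : Int) (t : Nat) (c r : List Int) :
    PySem.Set.ofList (c ++ (((pvRun a w (t + 1) ++ [a]).flatMap (pvG w)) ++ r))
      = PySem.Set.ofList (c ++ ((pvRun a w (t + 2) ++ [a]) ++ r)) := by
  have hfm : (pvRun a w (t + 1) ++ [a]).flatMap (pvG w)
      = (pvRun a w (t + 1)).flatMap (pvG w) ++ [a, a + w] := by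
    rw [List.flatMap_append]
    simp [pvG]
  have hmem : a + w ∈ pvRun a w (t + 2) := by
    have h1 : a + w = a + (((0 : Nat) : Int) + 1) * w := by push_cast; ring
    rw [h1]
    exact List.mem_map_of_mem (by simp : 0 ∈ List.range (t + 2))
  calc PySem.Set.ofList (c ++ (((pvRun a w (t + 1) ++ [a]).flatMap (pvG w)) ++ r))
      = PySem.Set.ofList (c ++ ((pvRun a w (t + 1)).flatMap (pvG w) ++ ([a, a + w] ++ r))) := by
        rw [hfm]; simp [List.append_assoc]
    _ = PySem.Set.ofList (c ++ (pvRun a w (t + 2) ++ ([a, a + w] ++ r))) := pv_runi w a t c _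
    _ = PySem.Set.ofList ((c ++ pvRun a w (t + 2) ++ [a]) ++ ([a + w] ++ r)) := by
        simp [List.append_assoc]
    _ = PySem.Set.ofList ((c ++ pvRun a w (t + 2) ++ [a]) ++ r) := by
        refine pv_drop _ _ _ ?_
        intro z hz
        simp only [List.mem_singleton] at hz
        subst hz
        exact List.mem_append_left _ (List.mem_append_right _ hmem)
    _ = PySem.Set.ofList (c ++ ((pvRun a w (t + 2) ++ [a]) ++ r)) := by
        simp [List.append_assoc]

theorem pv_seg_run (ps : List Int) (w : Int) (k j : Int) (_h0 : 0 ≤ j) (_hk : j < k) :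
    pvSeg ps w k j = pvRun (pvSum ps j) w (k - j).toNat ++ [pvSum ps j] := by
  unfold pvSeg pvRun
  congr 1
  rw [PySem.List.pyRange_one]
  have hb : (k - j + 1 - 1 : Int) = k - j := by ring
  rw [hb, List.map_map]
  apply List.map_congr_left
  intro m _
  simp only [Function.comp_apply]
  ring

theorem pv_sum_append (done : List Int) (x : Int) (j : Int) (h : j ≤ (done.length : Int)) :
    pvSum (done ++ [x]) j = pvSum done j := by
  unfold pvSum
  rw [List.take_append_of_le_length (by omega : j.toNat ≤ done.length)]

theorem pv_segs (done : List Int) (x w : Int) :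
    ∀ (js : List Int) (c r : List Int),
      (∀ j ∈ js, 0 ≤ j ∧ j < (done.length : Int)) →
      PySem.Set.ofList (c ++ ((js.flatMap (pvSeg done w done.length)).flatMap (pvG w) ++ r))
        = PySem.Set.ofList (c ++ (js.flatMap (pvSeg (done ++ [x]) w (done.length + 1)) ++ r)) := by
  intro js
  induction js with
  | nil => intro c r _; simp
  | cons j js' ih =>
    intro c r h
    obtain ⟨h0, hk⟩ := h j List.mem_cons_self
    set a := pvSum done j with ha
    have ht : ((done.length : Int) - j).toNat = ((done.length : Int) - j - 1).toNat + 1 := by omega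
    have ht2 : ((done.length : Int) + 1 - j).toNat = ((done.length : Int) - j - 1).toNat + 2 := by omega
    have hseg : pvSeg done w done.length j
        = pvRun a w (((done.length : Int) - j - 1).toNat + 1) ++ [a] := by
      rw [pv_seg_run done w done.length j h0 hk, ← ht]
    have hsum' : pvSum (done ++ [x]) j = a := pv_sum_append done x j (le_of_lt hk)
    have hseg' : pvSeg (done ++ [x]) w ((done.length : Int) + 1) j
        = pvRun a w (((done.length : Int) - j - 1).toNat + 2) ++ [a] := by
      rw [pv_seg_run (done ++ [x]) w ((done.length : Int) + 1) j h0 (by omega), hsum', ← ht2]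
    calc PySem.Set.ofList (c ++ (((j :: js').flatMap (pvSeg done w done.length)).flatMap (pvG w) ++ r))
        = PySem.Set.ofList (c ++ (((pvRun a w (((done.length : Int) - j - 1).toNat + 1) ++ [a]).flatMap (pvG w))
            ++ ((js'.flatMap (pvSeg done w done.length)).flatMap (pvG w) ++ r))) := by
          rw [List.flatMap_cons, List.flatMap_append, hseg]
          simp [List.append_assoc]
      _ = PySem.Set.ofList (c ++ ((pvRun a w (((done.length : Int) - j - 1).toNat + 2) ++ [a])
            ++ ((js'.flatMap (pvSeg done w done.length)).flatMap (pvG w) ++ r))) := by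
          exact pv_seg_step w a _ c _
      _ = PySem.Set.ofList ((c ++ (pvRun a w (((done.length : Int) - j - 1).toNat + 2) ++ [a]))
            ++ ((js'.flatMap (pvSeg done w done.length)).flatMap (pvG w) ++ r)) := by
          simp [List.append_assoc]
      _ = PySem.Set.ofList ((c ++ (pvRun a w (((done.length : Int) - j - 1).toNat + 2) ++ [a]))
            ++ (js'.flatMap (pvSeg (done ++ [x]) w ((done.length : Int) + 1)) ++ r)) := by
          exact ih _ r (fun j' hj' => h j' (List.mem_cons_of_mem _ hj'))
      _ = PySem.Set.ofList (c ++ ((j :: js').flatMap (pvSeg (done ++ [x]) w ((done.length : Int) + 1)) ++ r)) := by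
          rw [List.flatMap_cons, hseg']
          simp [List.append_assoc]

theorem pv_step_main (done : List Int) (x w : Int) :
    PySem.Set.ofList ([done.sum + w, done.sum + 0] ++ (pvF done w done.length).flatMap (pvG w))
      = PySem.Set.ofList (pvF (done ++ [x]) w ((done.length : Int) + 1)) := by
  have hk1 : ((done.length : Int) + 1 - 1) = (done.length : Int) := by ring
  have hcons : PySem.List.pyRange (done.length : Int) (-1) (-1)
      = (done.length : Int) :: PySem.List.pyRange ((done.length : Int) - 1) (-1) (-1) :=
    PySem.List.pyRange_neg_one_cons (by omega)
  have hsumk : pvSum (done ++ [x]) (done.length : Int) = done.sum := by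
    unfold pvSum
    rw [Int.toNat_natCast, List.take_append_of_le_length (le_refl _), List.take_length]
  have hheadseg : pvSeg (done ++ [x]) w ((done.length : Int) + 1) (done.length : Int)
      = [done.sum + 1 * w, done.sum] := by
    unfold pvSeg
    rw [hsumk]
    have h2 : ((done.length : Int) + 1 - (done.length : Int) + 1) = 1 + 1 := by ring
    rw [h2, PySem.List.pyRange_one_singleton]
    simp
  have hhead : ([done.sum + w, done.sum + 0] : List Int) = [done.sum + 1 * w, done.sum] := by
    norm_num
  rw [hhead]
  unfold pvF
  rw [hk1, hcons, List.flatMap_cons, hheadseg]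
  have := pv_segs done x w (PySem.List.pyRange ((done.length : Int) - 1) (-1) (-1))
    [done.sum + 1 * w, done.sum] []
    (fun j hj => by
      have := PySem.List.mem_pyRange_neg_one.1 hj
      omega)
  rw [List.append_nil, List.append_nil] at this
  rw [this]

theorem pv_inv (w : Int) (done : List Int) :
    done.foldl
      (fun (st : Int × PySem.Set Int) score =>
        let new_mode_b : PySem.Set Int := PySem.Set.empty
        let new_mode_b := PySem.Set.add new_mode_b (st.1 + w)
        let new_mode_b := PySem.Set.add new_mode_b (st.1 + 0)
        let new_mode_b := st.2.foldl
          (fun s x => PySem.Set.add (PySem.Set.add s (x + 0)) (x + w)) new_mode_b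
        (st.1 + score, new_mode_b))
      ((0 : Int), (PySem.Set.empty : PySem.Set Int))
    = (done.sum, PySem.Set.ofList (pvF done w done.length)) := by
  induction done using List.reverseRecOn with
  | nil =>
    simp [pvF, PySem.List.pyRange_neg_one_eq_nil (by norm_num : (-1 : Int) ≤ -1)]
  | append_singleton done x ih =>
    rw [List.foldl_append, ih]
    simp only [List.foldl_cons, List.foldl_nil]
    refine Prod.ext ?_ ?_
    · simp
    · show List.foldl (fun s x => PySem.Set.add (PySem.Set.add s (x + 0)) (x + w))
          (PySem.Set.add (PySem.Set.add PySem.Set.empty (done.sum + w)) (done.sum + 0))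
          (PySem.Set.ofList (pvF done w (done.length : Int)))
        = PySem.Set.ofList (pvF (done ++ [x]) w ((done ++ [x]).length : Int))
      rw [pv_fold2 w (PySem.Set.ofList (pvF done w (done.length : Int)))
          (PySem.Set.add (PySem.Set.add PySem.Set.empty (done.sum + w)) (done.sum + 0))]
      rw [show PySem.Set.add (PySem.Set.add PySem.Set.empty (done.sum + w)) (done.sum + 0)
          = PySem.Set.ofList [done.sum + w, done.sum + 0] from rfl]
      rw [← PySem.Set.ofList_append]
      rw [pv_flatMap_ofList (pvG w) (pvF done w (done.length : Int)) [done.sum + w, done.sum + 0]]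
      rw [pv_step_main done x w]
      have hlen : (((done ++ [x]).length : Nat) : Int) = (done.length : Int) + 1 := by
        simp
      rw [hlen]

-- B-side helpers
def pvPrefixes (ps : List Int) : List Int := (List.range (ps.length + 1)).map (fun j => (ps.take j).sum)

theorem pv_pfx (ps : List Int) :
    ps.foldl (fun acc s => acc ++ [PySem.List.pyGetD acc (-1) 0 + s]) [(0 : Int)] = pvPrefixes ps := by
  induction ps using List.reverseRecOn with
  | nil => simp [pvPrefixes]
  | append_singleton ps x ih =>
    rw [List.foldl_append, ih]
    simp only [List.foldl_cons, List.foldl_nil]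
    have hsnoc : pvPrefixes ps
        = (List.range ps.length).map (fun j => (ps.take j).sum) ++ [ps.sum] := by
      unfold pvPrefixes
      rw [List.range_succ, List.map_append]
      simp
    have hget : PySem.List.pyGetD (pvPrefixes ps) (-1) 0 = ps.sum := by
      rw [hsnoc]
      simp [PySem.List.pyGetD, PySem.List.pyGet?, PySem.List.pyIdx?]
    rw [hget]
    have h1 : pvPrefixes (ps ++ [x])
        = (List.range (ps.length + 1)).map (fun j => ((ps ++ [x]).take j).sum)
          ++ [(ps ++ [x]).sum] := by
      unfold pvPrefixes
      rw [List.length_append, List.length_singleton, List.range_succ, List.map_append]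
      simp
    have h2 : (List.range (ps.length + 1)).map (fun j => ((ps ++ [x]).take j).sum)
        = pvPrefixes ps := by
      unfold pvPrefixes
      apply List.map_congr_left
      intro j hj
      rw [List.take_append_of_le_length (by simpa [Nat.lt_succ_iff] using List.mem_range.1 hj)]
    rw [h1, h2]
    simp

theorem pv_pfx_get (ps : List Int) (j : Int) (h0 : 0 ≤ j) (hn : j ≤ (ps.length : Int)) :
    PySem.List.pyGetD (pvPrefixes ps) j 0 = pvSum ps j := by
  have hj : j = ((j.toNat : Nat) : Int) := (Int.toNat_of_nonneg h0).symm
  rw [hj, PySem.List.pyGetD_natCast]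
  unfold pvPrefixes pvSum
  have hlt : j.toNat < ps.length + 1 := by omega
  rw [List.getD_eq_getElem?_getD, List.getElem?_map]
  simp only [List.getElem?_range, hlt, Option.map_some, Option.getD_some]
  have hmax : (max j 0).toNat = j.toNat := by omega
  simp [hmax]

theorem pv_b_fold (w : Int) (n : Int) (f : Int → Int) :
    ∀ (js : List Int) (s : PySem.Set Int),
    js.foldl
      (fun t j =>
        let t := (PySem.List.pyRange 1 (n - j + 1) 1).foldl
          (fun t m => PySem.Set.add t (f j + m * w)) t
        PySem.Set.add t (f j)) s
    = PySem.Set.update s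
        (js.flatMap (fun j => (PySem.List.pyRange 1 (n - j + 1) 1).map (fun m => f j + m * w) ++ [f j])) := by
  intro js
  induction js with
  | nil => intro s; simp [PySem.Set.update]
  | cons j js' ih =>
    intro s
    simp only [List.foldl_cons, List.flatMap_cons]
    rw [ih]
    rw [← PySem.Set.update_map_eq_foldl_add]
    rw [show ∀ (t : PySem.Set Int), PySem.Set.add t (f j) = PySem.Set.update t [f j] from fun t => rfl]
    rw [← PySem.Set.update_append, ← PySem.Set.update_append, List.append_assoc]

theorem pv_a_eq (ps : List Int) (w : Int) :
    (get_world_question_score ps w).1 = PySem.Set.ofList ([ps.sum] ++ pvF ps w ps.length) := by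
  unfold get_world_question_score
  rw [pv_inv w ps]
  show PySem.Set.union (PySem.Set.ofList [ps.sum]) (PySem.Set.ofList (pvF ps w ps.length)) = _
  rw [show PySem.Set.union (PySem.Set.ofList [ps.sum]) (PySem.Set.ofList (pvF ps w ps.length))
      = PySem.Set.update (PySem.Set.ofList [ps.sum]) (PySem.Set.ofList (pvF ps w ps.length)) from rfl]
  rw [← PySem.Set.ofList_append, pv_ofList_right]

theorem pv_b_eq (ps : List Int) (w : Int) :
    (get_world_question_score_alt ps w).1 = PySem.Set.ofList ([ps.sum] ++ pvF ps w ps.length) := by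
  unfold get_world_question_score_alt
  dsimp only
  rw [pv_pfx ps]
  have hn : PySem.List.pyGetD (pvPrefixes ps) (ps.length : Int) 0 = ps.sum := by
    rw [pv_pfx_get ps _ (by omega) (le_refl _)]
    unfold pvSum
    simp
  rw [hn]
  rw [pv_b_fold w (ps.length : Int) (fun j => PySem.List.pyGetD (pvPrefixes ps) j 0)
    (PySem.List.pyRange ((ps.length : Int) - 1) (-1) (-1)) (PySem.Set.ofList [ps.sum])]
  show PySem.Set.update (PySem.Set.ofList [ps.sum]) _ = _
  rw [← PySem.Set.ofList_append]
  congr 1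
  unfold pvF
  congr 1
  apply List.flatMap_congr
  intro j hj
  obtain ⟨hj1, hj2⟩ := PySem.List.mem_pyRange_neg_one.1 hj
  rw [pv_pfx_get ps j (by omega) (by omega)]
  rfl

-- ===== VERDICT (by name: the statement is the Claim_ definition above) =====
theorem get_world_question_score_spec : Claim_equal_get_world_question_score := by
  intro ps w _
  show _ = _
  have ha := pv_a_eq ps w
  have hb := pv_b_eq ps w
  have h1 : (get_world_question_score ps w).1 = (get_world_question_score_alt ps w).1 := by rw [ha, hb]
  have h2 : (get_world_question_score ps w).2 = (get_world_question_score_alt ps w).2 := by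
    simp only [get_world_question_score, get_world_question_score_alt] at h1 ⊢
    rw [h1]
  exact Prod.ext h1 h2
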